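-- pv_equiv track=rewrite | github.com/slgero/receipt_parser | receipt_parser/finder.py | __remove_duplicate_word
-- ===== SOURCE A (Python) =====
-- from typing import Optional, List, Union, Dict
--
-- def __remove_duplicate_word(arr: List[str]) -> List[str]:
--     """
--     Remove duplicates in words when one name is a  continuation
--     of another: ['вода', 'вода питьевая'] --> ['вода питьевая'].
--
--     Parameters
--     ----------
--     arr : List[str]
--         List description of products in different variants.
--
--     Returns
--     -------
--     arr : List[str]
--         List description of products without duplicates.
--     """
--
--     if max([len(x.split()) for x in arr]) > 1:
--         arr = sorted(arr, key=lambda x: len(x.split()))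
--         one_words = []
--         for product in arr.copy():
--             if len(product.split()) == 1:
--                 one_words.append(product)
--             else:
--                 for word in one_words:
--                     if word in product and word in arr:
--                         arr.remove(word)
--     return arr
-- ===== SOURCE B (Python) =====
-- from typing import Optional, List, Union, Dict
--
--
-- def __remove_duplicate_word(arr: List[str]) -> List[str]:
--     """Drop single-word names that occur as substrings of a multi-word name.
--
--     Same result as the original, computed as a single filter over the sorted
--     list instead of repeated in-place removals.
--     """
--     if all(len(x.split()) <= 1 for x in arr):
--         return arr
--     multi = [x for x in arr if len(x.split()) > 1]
--     return [
--         x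
--         for x in sorted(arr, key=lambda x: len(x.split()))
--         if not (len(x.split()) == 1 and any(x in p for p in multi))
--     ]
-- ===== Notes on version B (the rewrite author's own statement) =====
-- stated objective: simpler
-- what changed: Replaces the mutate-while-iterating loop (repeated list.remove inside a nested scan over accumulated one-word names) by one pure filter over the sorted list against a precomputed set of dropped one-word names.
import Mathlib
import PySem

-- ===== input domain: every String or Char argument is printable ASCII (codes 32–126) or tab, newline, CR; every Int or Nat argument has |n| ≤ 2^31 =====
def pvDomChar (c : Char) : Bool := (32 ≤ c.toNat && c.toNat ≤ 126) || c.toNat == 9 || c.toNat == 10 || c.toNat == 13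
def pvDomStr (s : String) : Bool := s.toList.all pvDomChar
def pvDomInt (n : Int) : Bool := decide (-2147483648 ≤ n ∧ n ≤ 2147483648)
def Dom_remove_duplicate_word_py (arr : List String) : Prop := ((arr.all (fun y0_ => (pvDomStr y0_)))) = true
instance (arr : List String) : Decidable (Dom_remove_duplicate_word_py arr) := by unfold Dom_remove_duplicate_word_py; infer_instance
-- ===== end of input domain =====

-- B replaces A's mutate-while-iterating removal loop by one pure filter over the
-- sorted list (objective: simpler). Equivalence is about the RETURN value; A also
-- rebinds its local 'arr' but never mutates the caller's list.

-- ===== PORT A =====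
-- len(x.split())
def pvWc (x : String) : Nat := (PySem.Str.split₀ x).length

-- the inner 'for word in one_words' loop mutating arr
def pvInner (ow : List String) (a : List String) (product : String) : List String :=
  ow.foldl (fun a word =>
    if PySem.Str.isIn word product && a.contains word then
      (PySem.List.remove? a word).getD a
    else a) a

-- one iteration of 'for product in arr.copy()': state = (arr, one_words)
def pvStep (st : List String × List String) (product : String) : List String × List String :=
  if pvWc product = 1 then (st.1, st.2 ++ [product])
  else (pvInner st.2 st.1 product, st.2)

def remove_duplicate_word_py (arr : List String) : List String :=
  match PySem.List.max? (arr.map (fun x => (pvWc x : Int))) (fun y => y) with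
  | none => arr                       -- Python: max([]) raises ValueError; excluded by Pre_
  | some m =>
    if 1 < m then
      let s := PySem.List.sorted arr (fun x => pvWc x) false
      (s.foldl pvStep (s, [])).1
    else arr

-- ===== PORT B =====
def remove_duplicate_word_py_alt (arr : List String) : List String :=
  if arr.all (fun x => pvWc x ≤ 1) then arr
  else
    let multi := arr.filter (fun x => decide (1 < pvWc x))
    (PySem.List.sorted arr (fun x => pvWc x) false).filter
      (fun x => !(pvWc x == 1 && multi.any (fun p => PySem.Str.isIn x p)))

-- ===== PRECONDITION & SPEC =====
-- Pre_ excludes only the empty list, on which A raises ValueError (max of an empty sequence).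
def Pre_remove_duplicate_word_py (arr : List String) : Prop := arr ≠ []
instance (arr : List String) : Decidable (Pre_remove_duplicate_word_py arr) := by unfold Pre_remove_duplicate_word_py; infer_instance
def pvWitness_remove_duplicate_word_py : List String := ["ab", "a b"]

def Spec_remove_duplicate_word_py (arr : List String) (out : List String) : Prop := out = remove_duplicate_word_py_alt arr
instance (arr : List String) (out : List String) : Decidable (Spec_remove_duplicate_word_py arr out) := by unfold Spec_remove_duplicate_word_py; infer_instance

-- ===== CLAIM (what is proved, stated in full; the proofs are below) =====
def Claim_equal_remove_duplicate_word_py : Prop := ∀ (arr : List String), Dom_remove_duplicate_word_py arr → Pre_remove_duplicate_word_py arr → Spec_remove_duplicate_word_py arr (remove_duplicate_word_py arr)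

-- ===== LEMMAS AND PROOFS =====

-- erasing an element the filter drops anyway does not change the filter
lemma filter_erase_of_false (p : String → Bool) (w : String) (hp : p w = false) :
    ∀ (l : List String), (l.erase w).filter p = l.filter p := by
  intro l
  induction l with
  | nil => rfl
  | cons x t ih =>
    by_cases hx : x = w
    · subst hx
      rw [List.erase_cons_head, List.filter_cons, hp]
      simp
    · rw [List.erase_cons_tail (show ¬(x == w) = true by simp [hx]), List.filter_cons,
          List.filter_cons, ih]

-- any is invariant under permutation
lemma perm_any {l l' : List String} (h : l.Perm l') (f : String → Bool) : l.any f = l'.any f := by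
  cases hl : l.any f
  · symm
    rw [List.any_eq_false] at *
    intro x hx
    exact hl x (h.mem_iff.2 hx)
  · symm
    rw [List.any_eq_true] at *
    obtain ⟨x, hx, hfx⟩ := hl
    exact ⟨x, h.mem_iff.1 hx, hfx⟩

-- the inner loop removes exactly the one_words occurring in the product, provided
-- arr holds no more copies of any matching word than one_words does
lemma pvInner_char (prod : String) :
    ∀ (ow a : List String),
      (∀ x ∈ ow, PySem.Str.isIn x prod = true → a.count x ≤ ow.count x) →
      pvInner ow a prod = a.filter (fun x => !(decide (x ∈ ow) && PySem.Str.isIn x prod)) := by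
  intro ow
  induction ow with
  | nil => intro a _; simp [pvInner]
  | cons w ow' ih =>
    intro a hcnt
    have hstep : pvInner (w :: ow') a prod
        = pvInner ow' (if PySem.Str.isIn w prod && a.contains w then
            (PySem.List.remove? a w).getD a else a) prod := by
      simp [pvInner]
    by_cases hsub : PySem.Str.isIn w prod = true
    · have hsubC : PySem.Chars.isIn w.toList prod.toList = true := by simpa using hsub
      by_cases hmem : w ∈ a
      · have hma : a.contains w = true := by simpa using hmem
        have herase : (if PySem.Str.isIn w prod && a.contains w then
            (PySem.List.remove? a w).getD a else a) = a.erase w := by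
          rw [if_pos (show (PySem.Str.isIn w prod && a.contains w) = true by rw [hsub, hma]; rfl),
              PySem.List.remove?_eq_some_erase a w hmem, Option.getD_some]
        have hcnt' : ∀ x ∈ ow', PySem.Str.isIn x prod = true →
            (a.erase w).count x ≤ ow'.count x := by
          intro x hx hs
          by_cases hxw : x = w
          · subst hxw
            have h4 := hcnt x (by simp) hs
            rw [List.count_cons_self] at h4
            have hc : (a.erase x).count x = a.count x - 1 := by rw [List.count_erase_self]
            omega
          · have hc : (a.erase w).count x = a.count x := by rw [List.count_erase_of_ne hxw]
            have hxw' : ¬ w = x := fun hh => hxw hh.symm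
            have h4 := hcnt x (by simp [hx]) hs
            simp [hxw'] at h4
            omega
        rw [hstep, herase, ih _ hcnt']
        have hcong : (a.erase w).filter (fun x => !(decide (x ∈ ow') && PySem.Str.isIn x prod))
            = (a.erase w).filter (fun x => !(decide (x ∈ w :: ow') && PySem.Str.isIn x prod)) := by
          apply List.filter_congr
          intro x hxmem
          by_cases hxw : x = w
          · subst hxw
            have h2 : 0 < (a.erase x).count x := List.count_pos_iff.2 hxmem
            have h3 : (a.erase x).count x = a.count x - 1 := by rw [List.count_erase_self]
            have h4 := hcnt x (by simp) hsub
            rw [List.count_cons_self] at h4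
            have h5 : 0 < ow'.count x := by omega
            have hcw : x ∈ ow' := List.count_pos_iff.1 h5
            simp [hcw]
          · simp [hxw]
        rw [hcong]
        exact filter_erase_of_false _ w (by simp [hsubC]) a
      · have hma : a.contains w = false := by simpa using hmem
        have hid : (if PySem.Str.isIn w prod && a.contains w then
            (PySem.List.remove? a w).getD a else a) = a := by
          rw [if_neg (by rw [hsub, hma]; simp)]
        have hcnt' : ∀ x ∈ ow', PySem.Str.isIn x prod = true → a.count x ≤ ow'.count x := by
          intro x hx hs
          by_cases hxw : x = w
          · subst hxw
            rw [List.count_eq_zero_of_not_mem hmem]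
            exact Nat.zero_le _
          · have hxw' : ¬ w = x := fun hh => hxw hh.symm
            have h4 := hcnt x (by simp [hx]) hs
            simp [hxw'] at h4
            omega
        rw [hstep, hid, ih _ hcnt']
        apply List.filter_congr
        intro x hxmem
        by_cases hxw : x = w
        · subst hxw; exact absurd hxmem hmem
        · simp [hxw]
    · have hsf : PySem.Str.isIn w prod = false := by simpa using hsub
      have hsfC : PySem.Chars.isIn w.toList prod.toList = false := by simpa using hsf
      have hid : (if PySem.Str.isIn w prod && a.contains w then
          (PySem.List.remove? a w).getD a else a) = a := by
        rw [if_neg (by rw [hsf]; simp)]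
      have hcnt' : ∀ x ∈ ow', PySem.Str.isIn x prod = true → a.count x ≤ ow'.count x := by
        intro x hx hs
        have hxw : x ≠ w := by rintro rfl; rw [hs] at hsf; cases hsf
        have hxw' : ¬ w = x := fun hh => hxw hh.symm
        have h4 := hcnt x (by simp [hx]) hs
        simp [hxw'] at h4
        omega
      rw [hstep, hid, ih _ hcnt']
      apply List.filter_congr
      intro x _
      by_cases hxw : x = w
      · subst hxw; simp [hsfC]
      · simp [hxw]

-- folding the inner loop over the products filters out the matched one_words
lemma pvOuter_char :
    ∀ (t ow a : List String),
      (∀ x ∈ ow, a.count x ≤ ow.count x) →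
      t.foldl (fun a p => pvInner ow a p) a
        = a.filter (fun x => !(decide (x ∈ ow) && t.any (fun p => PySem.Str.isIn x p))) := by
  intro t
  induction t with
  | nil => intro ow a _; simp
  | cons p t' ih =>
    intro ow a hcnt
    have h1 : pvInner ow a p = a.filter (fun x => !(decide (x ∈ ow) && PySem.Str.isIn x p)) :=
      pvInner_char p ow a (fun x hx _ => hcnt x hx)
    have hcnt' : ∀ x ∈ ow, (pvInner ow a p).count x ≤ ow.count x := by
      intro x hx
      rw [h1]
      exact le_trans (List.Sublist.count_le x List.filter_sublist) (hcnt x hx)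
    calc (p :: t').foldl (fun a p => pvInner ow a p) a
        = t'.foldl (fun a p => pvInner ow a p) (pvInner ow a p) := by simp
      _ = (pvInner ow a p).filter
            (fun x => !(decide (x ∈ ow) && t'.any (fun p => PySem.Str.isIn x p))) := ih ow _ hcnt'
      _ = a.filter (fun x => !(decide (x ∈ ow) && (p :: t').any (fun p => PySem.Str.isIn x p))) := by
          rw [h1, List.filter_filter]
          apply List.filter_congr
          intro x _
          cases hc : decide (x ∈ ow) <;> simp [hc] <;> simp [Bool.and_comm]

-- a list sorted (nondecreasingly) by a key splits at any threshold
lemma sorted_split (f : String → Nat) (c : Nat) :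
    ∀ (l : List String), l.Pairwise (fun a b => f a ≤ f b) →
      l = l.filter (fun x => decide (f x ≤ c)) ++ l.filter (fun x => !decide (f x ≤ c)) := by
  intro l
  induction l with
  | nil => intro _; rfl
  | cons x t ih =>
    intro hp
    have hpt := hp.of_cons
    by_cases hle : f x ≤ c
    · simpa [List.filter_cons, hle] using ih hpt
    · have ht : t.filter (fun x => decide (f x ≤ c)) = [] := by
        rw [List.filter_eq_nil_iff]
        intro y hy
        have hxy := List.rel_of_pairwise_cons hp hy
        simp
        omega
      have ht2 : t.filter (fun x => !decide (f x ≤ c)) = t := by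
        rw [List.filter_eq_self]
        intro y hy
        have hxy := List.rel_of_pairwise_cons hp hy
        simp
        omega
      simp [hle, ht, ht2]

-- phase lemmas for the main loop
lemma fold_zero : ∀ (t : List String) (a : List String), (∀ p ∈ t, pvWc p ≠ 1) →
    t.foldl pvStep (a, ([] : List String)) = (a, []) := by
  intro t
  induction t with
  | nil => intro a _; rfl
  | cons p t' ih =>
    intro a h
    have hp := h p (by simp)
    have hst : pvStep (a, []) p = (a, []) := by simp [pvStep, hp, pvInner]
    simp only [List.foldl_cons, hst]
    exact ih a (fun q hq => h q (by simp [hq]))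

lemma fold_one : ∀ (t a ow : List String), (∀ p ∈ t, pvWc p = 1) →
    t.foldl pvStep (a, ow) = (a, ow ++ t) := by
  intro t
  induction t with
  | nil => intro a ow _; simp
  | cons p t' ih =>
    intro a ow h
    have hp := h p (by simp)
    have hst : pvStep (a, ow) p = (a, ow ++ [p]) := by simp [pvStep, hp]
    simp only [List.foldl_cons, hst]
    rw [ih a (ow ++ [p]) (fun q hq => h q (by simp [hq]))]
    simp

lemma fold_multi : ∀ (t a ow : List String), (∀ p ∈ t, pvWc p ≠ 1) →
    t.foldl pvStep (a, ow) = (t.foldl (fun a p => pvInner ow a p) a, ow) := by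
  intro t
  induction t with
  | nil => intro a ow _; rfl
  | cons p t' ih =>
    intro a ow h
    have hp := h p (by simp)
    have hst : pvStep (a, ow) p = (pvInner ow a p, ow) := by simp [pvStep, hp]
    simp only [List.foldl_cons, hst]
    exact ih _ ow (fun q hq => h q (by simp [hq]))

-- the whole of A's sort-and-remove pass equals B's single filter over the sorted list
lemma main_eq (arr : List String) :
    ((PySem.List.sorted arr (fun x => pvWc x) false).foldl pvStep
        (PySem.List.sorted arr (fun x => pvWc x) false, [])).1
    = (PySem.List.sorted arr (fun x => pvWc x) false).filter
        (fun x => !(pvWc x == 1 &&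
          (arr.filter (fun y => decide (1 < pvWc y))).any (fun p => PySem.Str.isIn x p))) := by
  set s := PySem.List.sorted arr (fun x => pvWc x) false with hs
  have hpair : s.Pairwise (fun a b => pvWc a ≤ pvWc b) := PySem.List.sorted_pairwise arr (fun x => pvWc x)
  have hperm : s.Perm arr := PySem.List.sorted_perm arr (fun x => pvWc x) false
  set t01 := s.filter (fun x => decide (pvWc x ≤ 1)) with ht01
  set t2 := s.filter (fun x => !decide (pvWc x ≤ 1)) with ht2
  have hsplit : s = t01 ++ t2 := sorted_split pvWc 1 s hpair
  have hpair01 : t01.Pairwise (fun a b => pvWc a ≤ pvWc b) :=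
    List.Pairwise.sublist List.filter_sublist hpair
  set t0 := t01.filter (fun x => decide (pvWc x ≤ 0)) with ht0
  set t1 := t01.filter (fun x => !decide (pvWc x ≤ 0)) with ht1
  have hsplit01 : t01 = t0 ++ t1 := sorted_split pvWc 0 t01 hpair01
  have h0 : ∀ p ∈ t0, pvWc p ≠ 1 := by
    intro p hp
    rw [ht0, List.mem_filter] at hp
    have := hp.2
    simp at this
    omega
  have h1 : ∀ p ∈ t1, pvWc p = 1 := by
    intro p hp
    rw [ht1, List.mem_filter] at hp
    obtain ⟨hp01, hpq⟩ := hp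
    rw [ht01, List.mem_filter] at hp01
    have := hp01.2
    simp at this hpq
    omega
  have h2 : ∀ p ∈ t2, pvWc p ≠ 1 := by
    intro p hp
    rw [ht2, List.mem_filter] at hp
    have := hp.2
    simp at this
    omega
  have hcounts : ∀ x ∈ t1, s.count x ≤ t1.count x := by
    intro x hx
    have hx' := hx
    rw [ht1, List.mem_filter] at hx'
    obtain ⟨hx01, hxq⟩ := hx'
    rw [ht01, List.mem_filter] at hx01
    have hc : t1.count x = s.count x := by
      rw [ht1, ht01, List.filter_filter, List.count_filter (by simp only [Bool.and_eq_true]; exact ⟨hxq, hx01.2⟩)]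
    omega
  have hfold : (s.foldl pvStep (s, [])).1
      = s.filter (fun x => !(decide (x ∈ t1) && t2.any (fun p => PySem.Str.isIn x p))) := by
    have hlist : s.foldl pvStep (s, []) = ((t0 ++ t1) ++ t2).foldl pvStep (s, []) := by
      rw [← hsplit01, ← hsplit]
    rw [hlist, List.foldl_append, List.foldl_append, fold_zero t0 s h0, fold_one t1 s [] h1,
        List.nil_append, fold_multi t2 s t1 h2]
    exact pvOuter_char t2 t1 s hcounts
  rw [hfold]
  apply List.filter_congr
  intro x hxs
  have hx1 : (x ∈ t1) ↔ pvWc x = 1 := by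
    rw [ht1, List.mem_filter, ht01, List.mem_filter]
    simp [hxs]
    omega
  have e1 : decide (x ∈ t1) = (pvWc x == 1) := by
    by_cases h : pvWc x = 1 <;> simp [hx1, h]
  have hpred : t2 = s.filter (fun y => decide (1 < pvWc y)) := by
    rw [ht2]
    apply List.filter_congr
    intro y _
    rw [← decide_not]
    exact decide_eq_decide.2 (by omega)
  have e2 : t2.any (fun p => PySem.Str.isIn x p)
      = (arr.filter (fun y => decide (1 < pvWc y))).any (fun p => PySem.Str.isIn x p) := by
    rw [hpred]
    exact perm_any (hperm.filter _) _
  rw [e1, e2]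

-- ===== VERDICT (by name: the statement is the Claim_ definition above) =====
theorem remove_duplicate_word_py_spec : Claim_equal_remove_duplicate_word_py := by
  intro arr _ hpre
  unfold Spec_remove_duplicate_word_py remove_duplicate_word_py remove_duplicate_word_py_alt
  cases hmax : PySem.List.max? (arr.map (fun x => (pvWc x : Int))) (fun y => y) with
  | none =>
    exfalso
    have hnil := (PySem.List.max?_eq_none_iff _ _).1 hmax
    exact hpre (by simpa using hnil)
  | some m =>
    by_cases hall : (arr.all (fun x => decide (pvWc x ≤ 1))) = true
    · have hm : ¬ 1 < m := by
        have hmem := PySem.List.max?_mem hmax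
        simp only [List.mem_map] at hmem
        obtain ⟨x, hx, hxm⟩ := hmem
        have hx1 := (List.all_eq_true.1 hall) x hx
        simp at hx1
        omega
      simp [hall, hm]
    · have hm : 1 < m := by
        rw [List.all_eq_true] at hall
        push Not at hall
        obtain ⟨x, hx, hwx⟩ := hall
        simp at hwx
        have hle := PySem.List.max?_isMax hmax ((pvWc x : Int)) (List.mem_map_of_mem hx)
        simp at hle
        omega
      simp only [hall, hm, if_true, if_false, Bool.false_eq_true]
      exact main_eq arr
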